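-- pv_equiv track=rewrite | github.com/provigil/bayesian_hdx | forward_model/forward_model.py | drop_duplicate_hbonds
-- ===== SOURCE A (Python) =====
-- def drop_duplicate_hbonds(hbonds):
--     unique_hbonds = []
--     seen_pairs = set()
--
--     for hbond in hbonds:
--         donor_acceptor_pair = (hbond[0], hbond[2])
--         if donor_acceptor_pair not in seen_pairs:
--             unique_hbonds.append(hbond)
--             seen_pairs.add(donor_acceptor_pair)
--
--     return unique_hbonds
-- ===== SOURCE B (Python) =====
-- def drop_duplicate_hbonds(hbonds):
--     out = []
--     rest = list(hbonds)
--     while rest: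
--         head = rest[0]
--         key = (head[0], head[2])
--         out.append(head)
--         rest = [hb for hb in rest[1:] if (hb[0], hb[2]) != key]
--     return out
-- ===== Notes on version B (the rewrite author's own statement) =====
-- stated objective: alternative
-- what changed: Replaces the seen-set-guarded single pass by repeated filtering: take the first hbond, delete every later hbond with the same (donor, acceptor) pair from the remainder, and repeat; no seen-set or dict is maintained at all.
import Mathlib
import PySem

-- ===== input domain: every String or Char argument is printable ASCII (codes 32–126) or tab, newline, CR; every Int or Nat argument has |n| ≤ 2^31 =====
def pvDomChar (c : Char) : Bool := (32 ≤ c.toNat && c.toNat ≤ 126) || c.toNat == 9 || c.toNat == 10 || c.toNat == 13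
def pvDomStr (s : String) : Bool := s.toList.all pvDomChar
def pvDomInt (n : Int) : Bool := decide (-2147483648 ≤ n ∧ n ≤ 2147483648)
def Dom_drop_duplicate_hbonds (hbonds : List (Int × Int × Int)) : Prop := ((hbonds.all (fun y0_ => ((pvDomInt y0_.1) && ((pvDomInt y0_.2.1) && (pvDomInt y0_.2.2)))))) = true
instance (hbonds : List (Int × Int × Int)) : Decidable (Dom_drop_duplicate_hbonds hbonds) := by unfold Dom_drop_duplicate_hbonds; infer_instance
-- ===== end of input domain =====

-- B replaces A's seen-set-guarded single pass by repeated filtering: emit the first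
-- hbond, delete all later hbonds sharing its (donor, acceptor) pair, repeat
-- (objective: alternative — no seen-set or dict is maintained).

-- ===== PORT A =====
def drop_duplicate_hbonds (hbonds : List (Int × Int × Int)) : List (Int × Int × Int) :=
  (hbonds.foldl
    (fun (st : List (Int × Int × Int) × PySem.Set (Int × Int)) hbond =>
      let pair := (hbond.1, hbond.2.2)
      if PySem.Set.contains st.2 pair then st
      else (st.1 ++ [hbond], PySem.Set.add st.2 pair))
    ([], PySem.Set.empty)).1

-- ===== PORT B =====
-- B's while loop: 'rest' shrinks each round (head removed, duplicates filtered);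
-- ported as the corresponding recursion on 'rest', appending 'head' in front.
def dropDupGo : List (Int × Int × Int) → List (Int × Int × Int)
  | [] => []
  | head :: tail =>
    head :: dropDupGo (tail.filter (fun hb => !((hb.1, hb.2.2) == (head.1, head.2.2))))
termination_by l => l.length
decreasing_by
  simp only [List.length_cons, List.length_unattach]
  exact Nat.lt_succ_of_le (le_trans (List.length_filter_le _ _) (by simp))

def drop_duplicate_hbonds_alt (hbonds : List (Int × Int × Int)) : List (Int × Int × Int) :=
  dropDupGo hbonds

-- ===== PRECONDITION & SPEC =====
def Spec_drop_duplicate_hbonds (hbonds : List (Int × Int × Int)) (out : List (Int × Int × Int)) : Prop := out = drop_duplicate_hbonds_alt hbonds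
instance (hbonds : List (Int × Int × Int)) (out : List (Int × Int × Int)) : Decidable (Spec_drop_duplicate_hbonds hbonds out) := by unfold Spec_drop_duplicate_hbonds; infer_instance

-- ===== CLAIM (what is proved, stated in full; the proofs are below) =====
def Claim_equal_drop_duplicate_hbonds : Prop := ∀ (hbonds : List (Int × Int × Int)), Dom_drop_duplicate_hbonds hbonds → Spec_drop_duplicate_hbonds hbonds (drop_duplicate_hbonds hbonds)

-- ===== LEMMAS AND PROOFS =====

-- A's fold step, abbreviated for the lemmas.
def dupStep (st : List (Int × Int × Int) × PySem.Set (Int × Int)) (hbond : Int × Int × Int) :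
    List (Int × Int × Int) × PySem.Set (Int × Int) :=
  let pair := (hbond.1, hbond.2.2)
  if PySem.Set.contains st.2 pair then st
  else (st.1 ++ [hbond], PySem.Set.add st.2 pair)

theorem foldl_dupStep_prepend (l : List (Int × Int × Int)) (u : List (Int × Int × Int))
    (s : PySem.Set (Int × Int)) :
    (l.foldl dupStep (u, s)).1 = u ++ (l.foldl dupStep ([], s)).1 := by
  induction l generalizing u s with
  | nil => simp
  | cons h t ih =>
    simp only [List.foldl_cons, dupStep]
    split
    · exact ih u s
    · rw [ih (u ++ [h]) _, ih ([] ++ [h]) _]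
      simp

theorem contains_add (s : PySem.Set (Int × Int)) (k p : Int × Int) :
    PySem.Set.contains (PySem.Set.add s k) p =
      (PySem.Set.contains s p || p == k) := by
  simp only [PySem.Set.add]
  split
  · rename_i hk
    by_cases hp : p = k
    · subst hp; simp [PySem.Set.contains] at hk ⊢; exact hk
    · simp [hp]
  · have hbd : (p == k) = decide (p = k) := by
      by_cases hp : p = k <;> simp [hp]
    simp [PySem.Set.contains, hbd]

-- Main invariant: A's fold from seen-set s equals B's repeated filtering applied to the
-- input with the already-seen pairs filtered out.
theorem fold_eq_go (l : List (Int × Int × Int)) (s : PySem.Set (Int × Int)) :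
    (l.foldl dupStep ([], s)).1 =
      dropDupGo (l.filter (fun hb => !(PySem.Set.contains s (hb.1, hb.2.2)))) := by
  induction l generalizing s with
  | nil => simp [dropDupGo]
  | cons h t ih =>
    simp only [List.foldl_cons, List.filter_cons]
    by_cases hc : PySem.Set.contains s (h.1, h.2.2) = true
    · simp only [dupStep, hc, if_true, Bool.not_true, Bool.false_eq_true, if_false]
      exact ih s
    · have hc' : PySem.Set.contains s (h.1, h.2.2) = false := by
        simpa using hc
      simp only [dupStep, hc', Bool.false_eq_true, if_false, Bool.not_false, if_true,
        List.nil_append]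
      rw [foldl_dupStep_prepend]
      rw [ih (PySem.Set.add s (h.1, h.2.2))]
      rw [dropDupGo]
      simp only [List.singleton_append, List.cons.injEq, true_and]
      congr 1
      rw [List.filter_filter]
      apply List.filter_congr
      intro hb _
      rw [contains_add]
      cases hcs : PySem.Set.contains s (hb.1, hb.2.2) <;>
        cases hbe : ((hb.1, hb.2.2) == (h.1, h.2.2)) <;> simp

-- ===== VERDICT (by name: the statement is the Claim_ definition above) =====
theorem drop_duplicate_hbonds_spec : Claim_equal_drop_duplicate_hbonds := by
  intro hbonds _
  unfold Spec_drop_duplicate_hbonds drop_duplicate_hbonds drop_duplicate_hbonds_alt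
  rw [show (fun (st : List (Int × Int × Int) × PySem.Set (Int × Int)) hbond =>
        let pair := (hbond.1, hbond.2.2)
        if PySem.Set.contains st.2 pair then st
        else (st.1 ++ [hbond], PySem.Set.add st.2 pair)) = dupStep from rfl]
  rw [fold_eq_go hbonds PySem.Set.empty]
  congr 1
  simp [PySem.Set.contains, PySem.Set.empty]
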